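-- pv_equiv track=rewrite | github.com/jrusso1020/CS4740 | nlp_project2_uncertainty/POStagger.py | spanRanges
-- ===== SOURCE A (Python) =====
-- def spanRanges(predictions):
--   ranges = []
--   inSpan = False
--   curRange = [0,0]
--   counter = 0
--   for i in range(len(predictions)):
--     sentence = predictions[i]
--     for j in range(len(sentence)):
--       tup = sentence[j]
--       if inSpan and tup[1] != "I-CUE":
--         curRange[1] = counter -1
--         inSpan = False
--         ranges.append((curRange[0],curRange[1]))
--       if not inSpan and tup[1] =="B-CUE":
--         inSpan = True
--         curRange[0] = counter
--       counter = counter+1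
--   formattedRanges = [str(tup[0])+'-'+str(tup[1]) for tup in ranges]
--   return " ".join(formattedRanges)
-- ===== SOURCE B (Python) =====
-- def spanRanges(predictions):
--   tags = [tag for sentence in predictions for (_, tag) in sentence]
--   n = len(tags)
--   parts = []
--   for i in range(n):
--     if tags[i] == "B-CUE":
--       j = i + 1
--       while j < n and tags[j] == "I-CUE":
--         j = j + 1
--       if j < n:
--         parts.append(str(i) + '-' + str(j - 1))
--   return " ".join(parts)
-- ===== Notes on version B (the rewrite author's own statement) =====
-- stated objective: alternative
-- what changed: Replaces A's inSpan/curRange/counter state machine over nested sentence loops with a flatten-then-scan approach: build the flat tag list once, find each B-CUE index, extend forward over I-CUEs, and keep the span only if a terminating token follows.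
import Mathlib
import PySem

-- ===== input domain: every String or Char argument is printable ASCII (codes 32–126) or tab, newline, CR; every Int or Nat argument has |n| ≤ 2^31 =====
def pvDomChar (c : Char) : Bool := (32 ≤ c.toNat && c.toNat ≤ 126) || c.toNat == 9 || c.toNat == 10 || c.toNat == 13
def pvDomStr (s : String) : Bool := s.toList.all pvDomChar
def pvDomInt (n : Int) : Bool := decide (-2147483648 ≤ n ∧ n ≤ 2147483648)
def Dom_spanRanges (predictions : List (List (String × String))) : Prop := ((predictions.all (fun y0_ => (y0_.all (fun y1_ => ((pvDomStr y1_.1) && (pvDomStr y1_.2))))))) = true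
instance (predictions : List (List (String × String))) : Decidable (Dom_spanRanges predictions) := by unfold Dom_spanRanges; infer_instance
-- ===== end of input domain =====

-- B replaces A's inSpan/curRange state machine by an explicit nested scan over the
-- flattened tag list (find each B-CUE, extend over I-CUEs, keep only terminated spans);
-- objective: alternative (same linear cost, plainer structure).

-- ===== PORT A =====
-- state = (ranges, inSpan, curRange, counter), exactly A's four variables
def spanRangesStep (st : List (Int × Int) × Bool × (Int × Int) × Int) (tup : String × String) :
    List (Int × Int) × Bool × (Int × Int) × Int :=
  let ranges := st.1
  let inSpan := st.2.1
  let curRange := st.2.2.1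
  let counter := st.2.2.2
  let (ranges, inSpan, curRange) :=
    if inSpan ∧ tup.2 ≠ "I-CUE" then
      let curRange := (curRange.1, counter - 1)
      (ranges ++ [(curRange.1, curRange.2)], false, curRange)
    else (ranges, inSpan, curRange)
  let (inSpan, curRange) :=
    if ¬ inSpan ∧ tup.2 = "B-CUE" then (true, (counter, curRange.2))
    else (inSpan, curRange)
  (ranges, inSpan, curRange, counter + 1)

def spanRanges (predictions : List (List (String × String))) : String :=
  let st := predictions.foldl (fun st sentence => sentence.foldl spanRangesStep st)
      ([], false, (0, 0), 0)
  PySem.Str.join " "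
    (st.1.map (fun tup => PySem.Int.toStr tup.1 ++ "-" ++ PySem.Int.toStr tup.2))

-- ===== PORT B =====
-- Source B's inner 'while j < n and tags[j] == "I-CUE": j += 1'
def scanIcue (tags : List String) (n : Int) (j : Int) : Int :=
  if h : j < n ∧ PySem.List.pyGet? tags j = some "I-CUE" then scanIcue tags n (j + 1) else j
  termination_by (n - j).toNat
  decreasing_by
    have := h.1
    omega

def spanRanges_alt (predictions : List (List (String × String))) : String :=
  let tags := predictions.flatMap (fun sentence => sentence.map (fun tup => tup.2))
  let n : Int := tags.length
  let parts := (PySem.List.pyRange 0 n 1).foldl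
    (fun parts i =>
      if PySem.List.pyGet? tags i = some "B-CUE" then
        let j := scanIcue tags n (i + 1)
        if j < n then parts ++ [PySem.Int.toStr i ++ "-" ++ PySem.Int.toStr (j - 1)] else parts
      else parts) []
  PySem.Str.join " " parts

-- ===== PRECONDITION & SPEC =====
def Spec_spanRanges (predictions : List (List (String × String))) (out : String) : Prop := out = spanRanges_alt predictions
instance (predictions : List (List (String × String))) (out : String) : Decidable (Spec_spanRanges predictions out) := by unfold Spec_spanRanges; infer_instance

-- ===== CLAIM (what is proved, stated in full; the proofs are below) =====
def Claim_equal_spanRanges : Prop := ∀ (predictions : List (List (String × String))), Dom_spanRanges predictions → Spec_spanRanges predictions (spanRanges predictions)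

-- ===== LEMMAS AND PROOFS =====

-- number of leading "I-CUE" tags
def leadI : List String → Nat
  | [] => 0
  | t :: ts => if t = "I-CUE" then leadI ts + 1 else 0

-- the common specification: spans found from position c in the tag suffix
def pairsFrom (c : Int) : List String → List (Int × Int)
  | [] => []
  | t :: ts =>
    (if t = "B-CUE" ∧ leadI ts < ts.length then [(c, c + leadI ts)] else []) ++
      pairsFrom (c + 1) ts

def fmtPair (p : Int × Int) : String := PySem.Int.toStr p.1 ++ "-" ++ PySem.Int.toStr p.2

def stepT (st : List (Int × Int) × Bool × (Int × Int) × Int) (t : String) :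
    List (Int × Int) × Bool × (Int × Int) × Int := spanRangesStep st ("", t)

lemma pairsFrom_skipI : ∀ (ts : List String) (c : Int),
    pairsFrom c ts = pairsFrom (c + leadI ts) (ts.drop (leadI ts)) := by
  intro ts
  induction ts with
  | nil => intro c; simp [leadI]
  | cons t ts ih =>
    intro c
    by_cases h : t = "I-CUE"
    · have hb : ¬ (t = "B-CUE" ∧ leadI ts < ts.length) := by
        rintro ⟨hb, -⟩; rw [h] at hb; exact absurd hb (by decide)
      simp only [pairsFrom, leadI, h]
      rw [ih (c + 1)]
      have : c + 1 + (leadI ts : Int) = c + ((leadI ts : Nat) + 1 : Nat) := by push_cast; ring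
      rw [this]
      rfl
    · simp [leadI, h]

lemma leadI_le : ∀ (ts : List String), leadI ts ≤ ts.length := by
  intro ts
  induction ts with
  | nil => simp [leadI]
  | cons t ts ih =>
    by_cases h : t = "I-CUE"
    · simp [leadI, h]
      omega
    · simp [leadI, h]

lemma foldA_spec : ∀ (ts : List String),
    (∀ (ranges : List (Int × Int)) (cur : Int × Int) (c : Int),
      (ts.foldl stepT (ranges, false, cur, c)).1 = ranges ++ pairsFrom c ts) ∧
    (∀ (ranges : List (Int × Int)) (s c1 c : Int),
      (ts.foldl stepT (ranges, true, (s, c1), c)).1 =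
        ranges ++ (if leadI ts < ts.length
          then (s, c + (leadI ts : Int) - 1) :: pairsFrom (c + leadI ts) (ts.drop (leadI ts))
          else [])) := by
  intro ts
  induction ts with
  | nil =>
    constructor
    · intro ranges cur c; simp [pairsFrom]
    · intro ranges s c1 c; simp [leadI]
  | cons t ts ih =>
    obtain ⟨ihP, ihQ⟩ := ih
    have hP : ∀ (ranges : List (Int × Int)) (cur : Int × Int) (c : Int),
        ((t :: ts).foldl stepT (ranges, false, cur, c)).1 = ranges ++ pairsFrom c (t :: ts) := by
      intro ranges cur c
      rw [List.foldl_cons]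
      by_cases hb : t = "B-CUE"
      · have hstep : stepT (ranges, false, cur, c) t = (ranges, true, (c, cur.2), c + 1) := by
          simp [stepT, spanRangesStep, hb]
        rw [hstep, ihQ]
        by_cases hm : leadI ts < ts.length
        · simp only [pairsFrom, hb, hm, and_self, if_pos]
          rw [pairsFrom_skipI ts (c + 1)]
          have h1 : c + 1 + (leadI ts : Int) - 1 = c + (leadI ts : Int) := by ring
          rw [h1]
          simp
        · have hlen : leadI ts = ts.length := le_antisymm (leadI_le ts) (by omega)
          simp only [pairsFrom, hb, hm, true_and]
          rw [pairsFrom_skipI ts (c + 1), hlen, List.drop_length]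
          simp [pairsFrom]
      · have hstep : stepT (ranges, false, cur, c) t = (ranges, false, cur, c + 1) := by
          simp [stepT, spanRangesStep, hb]
        rw [hstep, ihP]
        simp [pairsFrom, hb]
    have hQ : ∀ (ranges : List (Int × Int)) (s c1 c : Int),
        ((t :: ts).foldl stepT (ranges, true, (s, c1), c)).1 =
          ranges ++ (if leadI (t :: ts) < (t :: ts).length
            then (s, c + (leadI (t :: ts) : Int) - 1) ::
              pairsFrom (c + leadI (t :: ts)) ((t :: ts).drop (leadI (t :: ts)))
            else []) := by
      intro ranges s c1 c
      by_cases hi : t = "I-CUE"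
      · rw [List.foldl_cons]
        have hstep : stepT (ranges, true, (s, c1), c) t = (ranges, true, (s, c1), c + 1) := by
          simp [stepT, spanRangesStep, hi]
        rw [hstep, ihQ]
        have hl : leadI (t :: ts) = leadI ts + 1 := by simp [leadI, hi]
        rw [hl]
        by_cases hm : leadI ts < ts.length
        · have hm' : leadI ts + 1 < (t :: ts).length := by simp; omega
          rw [if_pos hm, if_pos hm']
          have h1 : c + ((leadI ts : Int) + 1) - 1 = c + 1 + (leadI ts : Int) - 1 := by ring
          have h2 : c + ((leadI ts : Int) + 1) = c + 1 + (leadI ts : Int) := by ring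
          push_cast
          rw [h1, h2]
          rfl
        · have hm' : ¬ (leadI ts + 1 < (t :: ts).length) := by simp; omega
          rw [if_neg hm, if_neg hm']
      · have hstep : stepT (ranges, true, (s, c1), c) t
            = stepT (ranges ++ [(s, c - 1)], false, (s, c - 1), c) t := by
          simp [stepT, spanRangesStep, hi]
        rw [List.foldl_cons, hstep, ← List.foldl_cons, hP]
        have hl : leadI (t :: ts) = 0 := by simp [leadI, hi]
        rw [hl]
        simp
    exact ⟨hP, hQ⟩

lemma scan_eq (tags : List String) : ∀ (k j : Nat), tags.length - j ≤ k → j ≤ tags.length →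
    scanIcue tags tags.length j = (j : Int) + leadI (tags.drop j) := by
  intro k
  induction k with
  | zero =>
    intro j hk hj
    have hj' : j = tags.length := by omega
    rw [scanIcue]
    rw [dif_neg (by simp [hj'])]
    subst hj'
    simp [List.drop_length, leadI]
  | succ k ih =>
    intro j hk hj
    by_cases hlt : j < tags.length
    · have hdrop : tags.drop j = tags[j] :: tags.drop (j + 1) := List.drop_eq_getElem_cons hlt
      by_cases hi : tags[j] = "I-CUE"
      · rw [scanIcue]
        rw [dif_pos ⟨by exact_mod_cast hlt, by simp [hlt, hi]⟩]
        have h1 : (j : Int) + 1 = ((j + 1 : Nat) : Int) := by push_cast; ring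
        rw [h1, ih (j + 1) (by omega) (by omega)]
        rw [hdrop]
        simp [leadI, hi]
        ring
      · rw [scanIcue]
        rw [dif_neg (by
          rintro ⟨-, hget⟩
          rw [PySem.List.pyGet?_natCast] at hget
          simp [List.getElem?_eq_getElem hlt] at hget
          exact hi hget)]
        rw [hdrop]
        simp [leadI, hi]
    · have hj' : j = tags.length := by omega
      rw [scanIcue]
      rw [dif_neg (by simp [hj'])]
      subst hj'
      simp [List.drop_length, leadI]

lemma foldB_spec (tags : List String) : ∀ (k i : Nat), tags.length - i ≤ k → i ≤ tags.length →
    ∀ (parts : List String),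
    (PySem.List.pyRange (i : Int) (tags.length : Int) 1).foldl
      (fun parts x =>
        if PySem.List.pyGet? tags x = some "B-CUE" then
          let j := scanIcue tags (tags.length : Int) (x + 1)
          if j < (tags.length : Int) then
            parts ++ [PySem.Int.toStr x ++ "-" ++ PySem.Int.toStr (j - 1)]
          else parts
        else parts) parts
      = parts ++ (pairsFrom (i : Int) (tags.drop i)).map fmtPair := by
  intro k
  induction k with
  | zero =>
    intro i hk hi parts
    have hi' : i = tags.length := by omega
    subst hi'
    rw [PySem.List.pyRange_one_eq_nil (by omega)]
    simp [List.drop_length, pairsFrom]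
  | succ k ih =>
    intro i hk hi parts
    by_cases hlt : i < tags.length
    · have hdrop : tags.drop i = tags[i] :: tags.drop (i + 1) := List.drop_eq_getElem_cons hlt
      rw [PySem.List.pyRange_one_cons (by exact_mod_cast hlt), List.foldl_cons]
      have hget : PySem.List.pyGet? tags (i : Int) = some tags[i] := by
        rw [PySem.List.pyGet?_natCast]
        simp [List.getElem?_eq_getElem hlt]
      have hcast : (i : Int) + 1 = ((i + 1 : Nat) : Int) := by push_cast; ring
      by_cases hb : tags[i] = "B-CUE"
      · have hscan : scanIcue tags (tags.length : Int) ((i : Int) + 1)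
            = ((i + 1 : Nat) : Int) + leadI (tags.drop (i + 1)) := by
          rw [hcast]; exact scan_eq tags (tags.length - (i + 1)) (i + 1) (le_refl _) (by omega)
        have hlen : (tags.drop (i + 1)).length = tags.length - (i + 1) := by simp
        simp only [hget, hb]
        rw [if_pos trivial]
        rw [hscan]
        by_cases hm : leadI (tags.drop (i + 1)) < (tags.drop (i + 1)).length
        · rw [if_pos (by omega)]
          rw [hcast, ih (i + 1) (by omega) (by omega)]
          rw [hdrop]
          simp only [pairsFrom, hb, hm, and_self, if_true, List.map_cons,
            List.append_assoc, List.cons_append, List.nil_append]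
          rw [← hcast]
          have harg : ((i : Int) + 1) + (leadI (tags.drop (i + 1)) : Int) - 1
              = (i : Int) + (leadI (tags.drop (i + 1)) : Int) := by ring
          rw [harg]
          rfl
        · rw [if_neg (by omega)]
          rw [hcast, ih (i + 1) (by omega) (by omega)]
          rw [hdrop]
          have hcond : ¬ (tags[i] = "B-CUE" ∧ leadI (tags.drop (i + 1)) < (tags.drop (i + 1)).length) := by
            rintro ⟨-, h⟩; exact hm h
          rw [pairsFrom, if_neg hcond, List.nil_append, hcast]
      · simp only [hget, Option.some_inj, hb, if_false]
        rw [hcast, ih (i + 1) (by omega) (by omega)]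
        rw [hdrop]
        have hcond : ¬ (tags[i] = "B-CUE" ∧ leadI (tags.drop (i + 1)) < (tags.drop (i + 1)).length) := by
          rintro ⟨h, -⟩; exact hb h
        rw [pairsFrom, if_neg hcond, List.nil_append, hcast]
    · have hi' : i = tags.length := by omega
      subst hi'
      rw [PySem.List.pyRange_one_eq_nil (by omega)]
      simp [List.drop_length, pairsFrom]

lemma sent_eq : ∀ (s : List (String × String)) (st : List (Int × Int) × Bool × (Int × Int) × Int),
    s.foldl spanRangesStep st = (s.map (fun tup => tup.2)).foldl stepT st := by
  intro s
  induction s with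
  | nil => intro st; rfl
  | cons t s ih =>
    intro st
    rw [List.map_cons, List.foldl_cons, List.foldl_cons, ih]
    rfl

lemma nested_eq : ∀ (preds : List (List (String × String)))
    (st : List (Int × Int) × Bool × (Int × Int) × Int),
    preds.foldl (fun st sentence => sentence.foldl spanRangesStep st) st
      = (preds.flatMap (fun sentence => sentence.map (fun tup => tup.2))).foldl stepT st := by
  intro preds
  induction preds with
  | nil => intro st; rfl
  | cons p ps ih =>
    intro st
    rw [List.foldl_cons, List.flatMap_cons, List.foldl_append, ih, sent_eq]

-- ===== VERDICT (by name: the statement is the Claim_ definition above) =====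
theorem spanRanges_spec : Claim_equal_spanRanges := by
  intro predictions _
  unfold Spec_spanRanges spanRanges spanRanges_alt
  simp only []
  rw [nested_eq]
  rw [(foldA_spec (predictions.flatMap (fun sentence => sentence.map (fun tup => tup.2)))).1]
  rw [List.nil_append]
  have hB := foldB_spec (predictions.flatMap (fun sentence => sentence.map (fun tup => tup.2)))
    (predictions.flatMap (fun sentence => sentence.map (fun tup => tup.2))).length 0
    (by omega) (by omega) []
  rw [Nat.cast_zero] at hB
  rw [hB, List.nil_append]
  rfl
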